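-- pv_equiv track=rewrite | github.com/gabrielima7/OmniAGI | omniagi/reasoning/advanced.py | _apply_primitive
-- ===== SOURCE A (Python) =====
-- from typing import Any, Callable, Dict, List, Optional, Tuple
--
-- def _apply_primitive(grid: List[List[int]], op: str) -> List[List[int]]:
--     """Apply a primitive operation."""
--     import copy
--     grid = copy.deepcopy(grid)
--
--     if op == "rotate_90":
--         return [list(row) for row in zip(*grid[::-1])]
--     elif op == "rotate_180":
--         return [row[::-1] for row in grid[::-1]]
--     elif op == "rotate_270":
--         return [list(row) for row in zip(*grid)][::-1]
--     elif op == "flip_horizontal":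
--         return [row[::-1] for row in grid]
--     elif op == "flip_vertical":
--         return grid[::-1]
--
--     return grid
-- ===== SOURCE B (Python) =====
-- _WORDS = {
--     "rotate_90": "VT",
--     "rotate_180": "VH",
--     "rotate_270": "TV",
--     "flip_horizontal": "H",
--     "flip_vertical": "V",
-- }
--
--
-- def _transpose(g):
--     if not g:
--         return []
--     n = min(len(r) for r in g)
--     return [[r[c] for r in g] for c in range(n)]
--
--
-- def _apply_primitive(grid, op):
--     """Apply a primitive operation, decomposed as a word over the generators
--     T (transpose), V (reverse row order), H (reverse each row)."""
--     g = [list(row) for row in grid]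
--     for gen in _WORDS.get(op, ""):
--         if gen == "T":
--             g = _transpose(g)
--         elif gen == "V":
--             g = g[::-1]
--         else:  # "H"
--             g = [row[::-1] for row in g]
--     return g
-- ===== Notes on version B (the rewrite author's own statement) =====
-- stated objective: alternative
-- what changed: Replaces the five ad-hoc zip/slice branches by a table-driven interpreter: each op is looked up as a word over three generators (transpose, reverse-rows, reverse-each-row) and the word is folded over the grid; transpose is computed by min-row-length indexing, which reproduces zip's truncation exactly, so equivalence is total (jagged and empty grids included).
import Mathlib
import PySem

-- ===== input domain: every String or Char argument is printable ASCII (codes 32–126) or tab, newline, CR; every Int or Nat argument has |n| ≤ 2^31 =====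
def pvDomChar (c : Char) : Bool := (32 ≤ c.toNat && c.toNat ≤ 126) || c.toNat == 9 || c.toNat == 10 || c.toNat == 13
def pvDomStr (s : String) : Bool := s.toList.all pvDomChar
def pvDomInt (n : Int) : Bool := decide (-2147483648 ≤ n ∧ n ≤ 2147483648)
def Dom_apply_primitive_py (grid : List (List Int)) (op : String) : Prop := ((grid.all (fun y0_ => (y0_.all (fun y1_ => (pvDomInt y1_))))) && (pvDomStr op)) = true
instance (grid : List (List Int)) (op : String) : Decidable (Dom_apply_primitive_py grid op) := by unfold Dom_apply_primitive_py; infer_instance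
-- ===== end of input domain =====

-- B replaces A's five zip/slice branches by a table-driven interpreter over three generators
-- (transpose / reverse rows / reverse each row); alternative decomposition, same asymptotic cost.

-- ===== PORT A =====
-- zip(*ls) for a list of rows, Python semantics: truncates at the shortest row (hand port, exact)
def pvZipStar (ls : List (List Int)) : List (List Int) :=
  if h : ls ≠ [] ∧ ls.all (fun l => !l.isEmpty) then
    (ls.map (fun l => l.headD 0)) :: pvZipStar (ls.map List.tail)
  else []
termination_by (ls.headD []).length
decreasing_by
  obtain ⟨h1, h2⟩ := h
  cases ls with
  | nil => exact absurd rfl h1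
  | cons a rest =>
    simp only [List.all_cons, Bool.and_eq_true, Bool.not_eq_eq_eq_not] at h2
    cases a with
    | nil => simp at h2
    | cons x xs => simp

def apply_primitive_py (grid : List (List Int)) (op : String) : List (List Int) :=
  if op = "rotate_90" then
    (pvZipStar ((PySem.List.slice? grid none none (-1)).getD [])).map (fun row => row)
  else if op = "rotate_180" then
    ((PySem.List.slice? grid none none (-1)).getD []).map
      (fun row => (PySem.List.slice? row none none (-1)).getD [])
  else if op = "rotate_270" then
    (PySem.List.slice? ((pvZipStar grid).map (fun row => row)) none none (-1)).getD []
  else if op = "flip_horizontal" then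
    grid.map (fun row => (PySem.List.slice? row none none (-1)).getD [])
  else if op = "flip_vertical" then
    (PySem.List.slice? grid none none (-1)).getD []
  else grid

-- ===== PORT B =====
-- _WORDS: the op -> generator-word table of Source B
def pvWords : PySem.Dict String String :=
  PySem.Dict.ofList
    [("rotate_90", "VT"), ("rotate_180", "VH"), ("rotate_270", "TV"),
     ("flip_horizontal", "H"), ("flip_vertical", "V")]

-- _transpose of Source B: n = min row length, output indexed over range n (r[c] is in range, getD exact)
def pvTranspose (g : List (List Int)) : List (List Int) :=
  match g with
  | [] => []
  | h :: t =>
    let n := t.foldl (fun acc r => min acc r.length) h.length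
    (List.range n).map (fun c => (h :: t).map (fun r => r.getD c 0))

-- one generator step of Source B's interpreter loop
def pvStep (g : List (List Int)) (gen : Char) : List (List Int) :=
  if gen = 'T' then pvTranspose g
  else if gen = 'V' then (PySem.List.slice? g none none (-1)).getD []
  else g.map (fun row => (PySem.List.slice? row none none (-1)).getD [])

def apply_primitive_py_alt (grid : List (List Int)) (op : String) : List (List Int) :=
  ((pvWords.getD op "").toList).foldl pvStep (grid.map (fun row => row))

-- ===== PRECONDITION & SPEC =====
def Spec_apply_primitive_py (grid : List (List Int)) (op : String) (out : List (List Int)) : Prop := out = apply_primitive_py_alt grid op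
instance (grid : List (List Int)) (op : String) (out : List (List Int)) : Decidable (Spec_apply_primitive_py grid op out) := by unfold Spec_apply_primitive_py; infer_instance

-- ===== CLAIM (what is proved, stated in full; the proofs are below) =====
def Claim_equal_apply_primitive_py : Prop := ∀ (grid : List (List Int)) (op : String), Dom_apply_primitive_py grid op → Spec_apply_primitive_py grid op (apply_primitive_py grid op)

-- ===== LEMMAS AND PROOFS =====

theorem pv_foldmin_le (t : List (List Int)) (a : Nat) :
    t.foldl (fun acc r => min acc r.length) a ≤ a ∧
      ∀ r ∈ t, t.foldl (fun acc r => min acc r.length) a ≤ r.length := by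
  induction t generalizing a with
  | nil => simp
  | cons x xs ih =>
    obtain ⟨h1, h2⟩ := ih (min a x.length)
    refine ⟨le_trans h1 (by omega), ?_⟩
    intro r hr
    rcases List.mem_cons.mp hr with hr | hr
    · subst hr; exact le_trans h1 (by omega)
    · exact h2 r hr

theorem pv_foldmin_pos (t : List (List Int)) (a : Nat) (ha : 0 < a)
    (h : ∀ r ∈ t, r ≠ []) : 0 < t.foldl (fun acc r => min acc r.length) a := by
  induction t generalizing a with
  | nil => simpa
  | cons x xs ih =>
    have hx : 0 < x.length := List.length_pos_iff.mpr (h x (by simp))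
    exact ih (min a x.length) (by omega) (fun r hr => h r (by simp [hr]))

theorem pv_foldmin_tail (t : List (List Int)) (a : Nat) (ha : 0 < a)
    (h : ∀ r ∈ t, r ≠ []) :
    (t.map List.tail).foldl (fun acc r => min acc r.length) (a - 1) =
      t.foldl (fun acc r => min acc r.length) a - 1 := by
  induction t generalizing a with
  | nil => simp
  | cons x xs ih =>
    have hx : 0 < x.length := List.length_pos_iff.mpr (h x (by simp))
    simp only [List.map_cons, List.foldl_cons, List.length_tail]
    have : min (a - 1) (x.length - 1) = min a x.length - 1 := by omega
    rw [this]
    exact ih (min a x.length) (by omega) (fun r hr => h r (by simp [hr]))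

theorem pv_getD_tail {α : Type} (l : List α) (c : Nat) (d : α) :
    l.tail.getD c d = l.getD (c + 1) d := by
  cases l <;> simp [List.getD]

theorem pv_zip_eq_range (m : Nat) : ∀ (h : List Int) (t : List (List Int)),
    t.foldl (fun acc r => min acc r.length) h.length = m →
    pvZipStar (h :: t) = (List.range m).map (fun c => (h :: t).map (fun r => r.getD c 0)) := by
  induction m with
  | zero =>
    intro h t hm
    rw [pvZipStar, dif_neg]
    · simp
    · rintro ⟨-, hall⟩
      rw [List.all_eq_true] at hall
      have hne : ∀ r ∈ h :: t, r ≠ [] := by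
        intro r hr
        have := hall r hr
        simpa [List.isEmpty_iff] using this
      have hh : 0 < h.length := List.length_pos_iff.mpr (hne h (by simp))
      have := pv_foldmin_pos t h.length hh (fun r hr => hne r (by simp [hr]))
      omega
  | succ k ih =>
    intro h t hm
    have hne : ∀ r ∈ h :: t, r ≠ [] := by
      intro r hr
      rcases List.mem_cons.mp hr with hr | hr
      · intro he
        have := (pv_foldmin_le t h.length).1
        subst hr; subst he; simp at this hm; omega
      · intro he
        have := (pv_foldmin_le t h.length).2 r hr
        subst he; simp at this; omega
    have hh : 0 < h.length := List.length_pos_iff.mpr (hne h (by simp))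
    rw [pvZipStar, dif_pos]
    · have htail : (t.map List.tail).foldl (fun acc r => min acc r.length) h.tail.length = k := by
        rw [List.length_tail, pv_foldmin_tail t h.length hh (fun r hr => hne r (by simp [hr])), hm]
        omega
      have : (h :: t).map List.tail = h.tail :: t.map List.tail := by simp
      rw [this, ih h.tail (t.map List.tail) htail]
      rw [List.range_succ_eq_map]
      simp only [List.map_cons, List.map_map]
      congr 1
      · have hhead : ∀ l ∈ h :: t, l.headD 0 = l.getD 0 0 := by
          intro l hl
          have hl0 := hne l hl
          cases l with
          | nil => exact absurd rfl hl0
          | cons x xs => simp [List.getD]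
        have := List.map_congr_left hhead
        simpa using this
      · apply List.map_congr_left
        intro c _
        have hc : ∀ l ∈ h :: t, l.tail.getD c 0 = l.getD (c + 1) 0 :=
          fun l _ => pv_getD_tail l c 0
        simpa [Function.comp] using List.map_congr_left hc
    · refine ⟨by simp, ?_⟩
      rw [List.all_eq_true]
      intro l hl
      have := hne l hl
      cases l with
      | nil => exact absurd rfl this
      | cons x xs => simp

theorem pv_zipStar_eq_transpose (g : List (List Int)) : pvZipStar g = pvTranspose g := by
  cases g with
  | nil => rw [pvZipStar]; simp [pvTranspose]
  | cons h t =>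
    simp only [pvTranspose]
    exact pv_zip_eq_range _ h t rfl

theorem pv_word_90 : (pvWords.getD "rotate_90" "").toList = ['V', 'T'] := by decide
theorem pv_word_180 : (pvWords.getD "rotate_180" "").toList = ['V', 'H'] := by decide
theorem pv_word_270 : (pvWords.getD "rotate_270" "").toList = ['T', 'V'] := by decide
theorem pv_word_fh : (pvWords.getD "flip_horizontal" "").toList = ['H'] := by decide
theorem pv_word_fv : (pvWords.getD "flip_vertical" "").toList = ['V'] := by decide
theorem pv_keys_words :
    pvWords.keys = ["rotate_90", "rotate_180", "rotate_270", "flip_horizontal", "flip_vertical"] := by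
  decide

-- ===== VERDICT (by name: the statement is the Claim_ definition above) =====
theorem apply_primitive_py_spec : Claim_equal_apply_primitive_py := by
  intro grid op _
  unfold Spec_apply_primitive_py apply_primitive_py apply_primitive_py_alt
  by_cases h90 : op = "rotate_90"
  · subst h90
    rw [pv_word_90]
    simp [pvStep, pv_zipStar_eq_transpose]
  · by_cases h180 : op = "rotate_180"
    · subst h180
      rw [pv_word_180]
      simp [pvStep, h90]
    · by_cases h270 : op = "rotate_270"
      · subst h270
        rw [pv_word_270]
        simp [pvStep, h90, h180, pv_zipStar_eq_transpose]
      · by_cases hfh : op = "flip_horizontal"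
        · subst hfh
          rw [pv_word_fh]
          simp [pvStep, h90, h180, h270]
        · by_cases hfv : op = "flip_vertical"
          · subst hfv
            rw [pv_word_fv]
            simp [pvStep, h90, h180, h270, hfh]
          · have hnone : pvWords.get? op = none := by
              rw [PySem.Dict.get?_eq_none_iff_not_mem_keys, pv_keys_words]
              simp [h90, h180, h270, hfh, hfv]
            rw [PySem.Dict.getD_eq_get?_getD, hnone]
            simp [h90, h180, h270, hfh, hfv]
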